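-- pv_equiv track=rewrite | github.com/axlrose023/youtube_automation | backend/src/app/services/mobile_app/android/youtube/ad_record.py | _choose_primary_cta
-- ===== SOURCE A (Python) =====
-- _GENERIC_CTA_TEXTS = {
--     "visit advertiser",
-- }
--
-- def _choose_primary_cta(values: list[str | None]) -> str | None:
--     normalized: list[str] = []
--     seen: set[str] = set()
--     for value in values:
--         if not isinstance(value, str):
--             continue
--         stripped = value.strip()
--         if not stripped:
--             continue
--         lowered = stripped.casefold()
--         if lowered in seen:
--             continue
--         seen.add(lowered)
--         normalized.append(stripped)
--     preferred = [
--         value for value in normalized if value.casefold() not in _GENERIC_CTA_TEXTS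
--     ]
--     if preferred:
--         return preferred[-1]
--     if normalized:
--         return normalized[-1]
--     return None
-- ===== SOURCE B (Python) =====
-- _GENERIC_CTA_TEXTS = {
--     "visit advertiser",
-- }
--
-- def _choose_primary_cta(values):
--     seen = set()
--     last_any = None
--     last_preferred = None
--     for value in values:
--         if not isinstance(value, str):
--             continue
--         stripped = value.strip()
--         if not stripped:
--             continue
--         lowered = stripped.casefold()
--         if lowered in seen:
--             continue
--         seen.add(lowered)
--         last_any = stripped
--         if lowered not in _GENERIC_CTA_TEXTS:
--             last_preferred = stripped
--     return last_preferred if last_preferred is not None else last_any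
-- ===== Notes on version B (the rewrite author's own statement) =====
-- stated objective: simpler
-- what changed: Fused A's dedup pass, filter pass and tail lookups into one loop that keeps only a seen set and two running variables (last accepted value, last non-generic accepted value), dropping the intermediate normalized and preferred lists.
import Mathlib
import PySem

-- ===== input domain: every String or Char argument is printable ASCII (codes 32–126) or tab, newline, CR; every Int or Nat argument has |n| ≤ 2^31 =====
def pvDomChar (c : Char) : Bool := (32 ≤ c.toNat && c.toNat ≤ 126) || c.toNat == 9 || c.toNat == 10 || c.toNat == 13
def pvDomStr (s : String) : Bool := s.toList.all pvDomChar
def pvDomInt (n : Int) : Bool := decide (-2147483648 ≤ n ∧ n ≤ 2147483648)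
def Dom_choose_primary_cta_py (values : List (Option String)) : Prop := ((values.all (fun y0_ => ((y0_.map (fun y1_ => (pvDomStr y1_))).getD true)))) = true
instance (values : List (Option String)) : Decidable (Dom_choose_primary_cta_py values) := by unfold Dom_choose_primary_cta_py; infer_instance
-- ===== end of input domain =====

-- B fuses A's dedup pass, filter pass and tail lookups into one loop keeping a seen set
-- and two running "last" variables (objective: simpler).
-- casefold is ported as PySem.Str.lower: exact on the ASCII Dom.

-- shared module constant _GENERIC_CTA_TEXTS
def pyGenericCTA : PySem.Set String := PySem.Set.ofList ["visit advertiser"]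

-- ===== PORT A =====
-- loop body of A: dedup-by-casefold accumulation of (normalized, seen)
def ctaStepA (st : List String × PySem.Set String) (value : Option String) :
    List String × PySem.Set String :=
  match value with
  | none => st
  | some v =>
    let stripped := PySem.Str.strip v
    if stripped = "" then st
    else
      let lowered := PySem.Str.lower stripped
      if PySem.Set.contains st.2 lowered then st
      else (st.1 ++ [stripped], PySem.Set.add st.2 lowered)

def choose_primary_cta_py (values : List (Option String)) : Option String :=
  let st := values.foldl ctaStepA ([], PySem.Set.empty)
  let normalized := st.1
  let preferred := normalized.filter
    (fun v => !(PySem.Set.contains pyGenericCTA (PySem.Str.lower v)))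
  if ¬ preferred.isEmpty then preferred.getLast?
  else if ¬ normalized.isEmpty then normalized.getLast?
  else none

-- ===== PORT B =====
-- loop body of B: state is (seen, last_any, last_preferred)
def ctaStepB (st : PySem.Set String × Option String × Option String) (value : Option String) :
    PySem.Set String × Option String × Option String :=
  match value with
  | none => st
  | some v =>
    let stripped := PySem.Str.strip v
    if stripped = "" then st
    else
      let lowered := PySem.Str.lower stripped
      if PySem.Set.contains st.1 lowered then st
      else
        (PySem.Set.add st.1 lowered, some stripped,
         if PySem.Set.contains pyGenericCTA lowered then st.2.2 else some stripped)

def choose_primary_cta_py_alt (values : List (Option String)) : Option String :=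
  let st := values.foldl ctaStepB (PySem.Set.empty, none, none)
  match st.2.2 with
  | some x => some x
  | none => st.2.1

-- ===== PRECONDITION & SPEC =====
def Spec_choose_primary_cta_py (values : List (Option String)) (out : Option String) : Prop := out = choose_primary_cta_py_alt values
instance (values : List (Option String)) (out : Option String) : Decidable (Spec_choose_primary_cta_py values out) := by unfold Spec_choose_primary_cta_py; infer_instance

-- ===== CLAIM (what is proved, stated in full; the proofs are below) =====
def Claim_equal_choose_primary_cta_py : Prop := ∀ (values : List (Option String)), Dom_choose_primary_cta_py values → Spec_choose_primary_cta_py values (choose_primary_cta_py values)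

-- ===== LEMMAS AND PROOFS =====

-- the filter predicate of A's second pass
def ctaP (v : String) : Bool := !(PySem.Set.contains pyGenericCTA (PySem.Str.lower v))

theorem stepA_none (st : List String × PySem.Set String) : ctaStepA st none = st := rfl

theorem stepB_none (st : PySem.Set String × Option String × Option String) :
    ctaStepB st none = st := rfl

theorem stepA_blank (st : List String × PySem.Set String) (v : String)
    (h : PySem.Str.strip v = "") : ctaStepA st (some v) = st := by
  simp only [ctaStepA]; rw [if_pos h]

theorem stepB_blank (st : PySem.Set String × Option String × Option String) (v : String)
    (h : PySem.Str.strip v = "") : ctaStepB st (some v) = st := by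
  simp only [ctaStepB]; rw [if_pos h]

theorem stepA_seen (norm : List String) (seen : PySem.Set String) (v : String)
    (h1 : ¬ PySem.Str.strip v = "")
    (h2 : PySem.Set.contains seen (PySem.Str.lower (PySem.Str.strip v)) = true) :
    ctaStepA (norm, seen) (some v) = (norm, seen) := by
  simp only [ctaStepA]; rw [if_neg h1, if_pos h2]

theorem stepB_seen (seen : PySem.Set String) (la lp : Option String) (v : String)
    (h1 : ¬ PySem.Str.strip v = "")
    (h2 : PySem.Set.contains seen (PySem.Str.lower (PySem.Str.strip v)) = true) :
    ctaStepB (seen, la, lp) (some v) = (seen, la, lp) := by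
  simp only [ctaStepB]; rw [if_neg h1, if_pos h2]

theorem stepA_new (norm : List String) (seen : PySem.Set String) (v : String)
    (h1 : ¬ PySem.Str.strip v = "")
    (h2 : PySem.Set.contains seen (PySem.Str.lower (PySem.Str.strip v)) = false) :
    ctaStepA (norm, seen) (some v) =
      (norm ++ [PySem.Str.strip v], PySem.Set.add seen (PySem.Str.lower (PySem.Str.strip v))) := by
  simp only [ctaStepA]; rw [if_neg h1, if_neg (by simpa using h2)]

theorem stepB_new (seen : PySem.Set String) (la lp : Option String) (v : String)
    (h1 : ¬ PySem.Str.strip v = "")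
    (h2 : PySem.Set.contains seen (PySem.Str.lower (PySem.Str.strip v)) = false) :
    ctaStepB (seen, la, lp) (some v) =
      (PySem.Set.add seen (PySem.Str.lower (PySem.Str.strip v)), some (PySem.Str.strip v),
       if PySem.Set.contains pyGenericCTA (PySem.Str.lower (PySem.Str.strip v)) = true then lp
       else some (PySem.Str.strip v)) := by
  simp only [ctaStepB]; rw [if_neg h1, if_neg (by simpa using h2)]

theorem cta_filter_concat (norm : List String) (v : String) :
    (if PySem.Set.contains pyGenericCTA (PySem.Str.lower (PySem.Str.strip v)) = true
       then (List.filter ctaP norm).getLast?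
       else some (PySem.Str.strip v)) =
    (List.filter ctaP (norm ++ [PySem.Str.strip v])).getLast? := by
  rw [List.filter_append]
  by_cases hg : PySem.Set.contains pyGenericCTA (PySem.Str.lower (PySem.Str.strip v)) = true
  · rw [if_pos hg]
    have : List.filter ctaP [PySem.Str.strip v] = [] := by
      simp only [ctaP, List.filter]
      simp [by simpa using hg]
    rw [this, List.append_nil]
  · rw [if_neg hg]
    have : List.filter ctaP [PySem.Str.strip v] = [PySem.Str.strip v] := by
      simp only [ctaP, List.filter]
      simp [by simpa using hg]
    rw [this, List.getLast?_append]
    rfl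

-- loop invariant: B's state is (A's seen, last of normalized, last of the preferred filter)
theorem ctaInv (values : List (Option String)) :
    ∀ (norm : List String) (seen : PySem.Set String),
    values.foldl ctaStepB (seen, norm.getLast?, (norm.filter ctaP).getLast?) =
      ((values.foldl ctaStepA (norm, seen)).2,
       (values.foldl ctaStepA (norm, seen)).1.getLast?,
       ((values.foldl ctaStepA (norm, seen)).1.filter ctaP).getLast?) := by
  induction values with
  | nil => intro norm seen; rfl
  | cons v vs ih =>
    intro norm seen
    rw [List.foldl_cons, List.foldl_cons]
    match v with
    | none => rw [stepA_none, stepB_none]; exact ih norm seen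
    | some s =>
      by_cases h1 : PySem.Str.strip s = ""
      · rw [stepA_blank _ _ h1, stepB_blank _ _ h1]; exact ih norm seen
      · by_cases h2 : PySem.Set.contains seen (PySem.Str.lower (PySem.Str.strip s)) = true
        · rw [stepA_seen _ _ _ h1 h2, stepB_seen _ _ _ _ h1 h2]; exact ih norm seen
        · have h2' : PySem.Set.contains seen (PySem.Str.lower (PySem.Str.strip s)) = false := by
            simpa using h2
          rw [stepA_new _ _ _ h1 h2', stepB_new _ _ _ _ h1 h2', cta_filter_concat]
          have h3 := ih (norm ++ [PySem.Str.strip s])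
            (PySem.Set.add seen (PySem.Str.lower (PySem.Str.strip s)))
          rwa [List.getLast?_concat] at h3

-- ===== VERDICT (by name: the statement is the Claim_ definition above) =====
theorem choose_primary_cta_py_spec : Claim_equal_choose_primary_cta_py := by
  intro values _
  unfold Spec_choose_primary_cta_py
  simp only [choose_primary_cta_py, choose_primary_cta_py_alt]
  have hf : (fun v => !(PySem.Set.contains pyGenericCTA (PySem.Str.lower v))) = ctaP := rfl
  rw [hf]
  have h := ctaInv values [] PySem.Set.empty
  simp only [List.getLast?_nil, List.filter_nil] at h
  rw [h]
  cases hp : List.filter ctaP (values.foldl ctaStepA ([], PySem.Set.empty)).1 with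
  | nil =>
    cases hn : (values.foldl ctaStepA ([], PySem.Set.empty)).1 with
    | nil => rfl
    | cons b m => simp
  | cons a l => rw [List.getLast?_cons]; simp
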